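-- pv_equiv track=rewrite | github.com/Sadeeptha-B/Advanced-Algorithms | Week 2/boyer_moore.py | bad_character_matrix
-- ===== SOURCE A (Python) =====
-- ALPHABET_SIZE = 26
--
-- def bad_character_matrix(pat):
--     mat = [None] * ALPHABET_SIZE # O(26)
--
--     #O(26m)
--     for i in range(len(pat)-1, -1, -1):
--         ind = ord(pat[i]) - 97
--
--         if mat[ind] is None:
--             mat[ind] = [-1]* len(pat)
--
--         for j in range(i, len(pat)):
--             if mat[ind][j] == -1:
--                 mat[ind][j] = i
--             else:
--                 break
--     return mat
-- ===== SOURCE B (Python) =====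
-- ALPHABET_SIZE = 26
--
-- def bad_character_matrix(pat):
--     m = len(pat)
--     mat = [None] * ALPHABET_SIZE
--     last = [-1] * ALPHABET_SIZE  # most recent index of each slot seen so far
--     for j in range(m):
--         ind = ord(pat[j]) - 97
--         last[ind] = j
--         if mat[ind] is None:
--             mat[ind] = [-1] * m
--         for c in range(ALPHABET_SIZE):
--             if mat[c] is not None:
--                 mat[c][j] = last[c]
--     return mat
-- ===== Notes on version B (the rewrite author's own statement) =====
-- stated objective: alternative
-- what changed: Replaced A's backward scan with a fill-until-break inner loop by a single forward pass that maintains a last-seen index per character slot and writes each matrix column once from that accumulator; Pre_ admits exactly the patterns on which A returns (all char codes in [71,122]; outside it both programs raise IndexError on the 26-slot table).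
import Mathlib
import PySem

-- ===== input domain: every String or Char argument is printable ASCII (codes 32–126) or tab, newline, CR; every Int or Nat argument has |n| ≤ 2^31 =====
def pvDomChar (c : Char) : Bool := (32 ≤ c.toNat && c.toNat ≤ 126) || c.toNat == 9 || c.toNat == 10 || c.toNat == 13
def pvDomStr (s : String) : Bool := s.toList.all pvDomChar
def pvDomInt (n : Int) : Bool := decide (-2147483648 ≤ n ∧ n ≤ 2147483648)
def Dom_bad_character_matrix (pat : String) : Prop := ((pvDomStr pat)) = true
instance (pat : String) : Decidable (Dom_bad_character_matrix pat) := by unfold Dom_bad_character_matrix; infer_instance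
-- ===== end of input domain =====

-- B replaces A's backward scan + fill-until-break by a single forward pass keeping a
-- last-seen index per slot and writing each column once (alternative decomposition,
-- same O(26m) cost); equivalence is proved on all inputs where the Python A returns.

-- ===== PORT A =====
-- inner loop 'for j in range(i, len(pat)): if mat[ind][j] == -1: mat[ind][j] = i else: break'
def pvFillA (i : Int) (js : List Int) (row : List Int) : List Int :=
  match js with
  | [] => row
  | j :: rest =>
      if PySem.List.pyGetD row j 0 = -1 then pvFillA i rest (PySem.List.pySetD row j i)
      else row

-- body of A's outer 'for i in range(len(pat)-1, -1, -1)'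
def pvStepA (s : List Char) (mat : List (Option (List Int))) (i : Int) : List (Option (List Int)) :=
  let ind : Int := ((PySem.List.pyGetD s i ' ').toNat : Int) - 97
  let mat := if PySem.List.pyGetD mat ind none = none
    then PySem.List.pySetD mat ind (some (List.replicate s.length (-1))) else mat
  let row := (PySem.List.pyGetD mat ind none).getD []
  PySem.List.pySetD mat ind (some (pvFillA i (PySem.List.pyRange i (s.length : Int) 1) row))

def bad_character_matrix (pat : String) : List (Option (List Int)) :=
  (PySem.List.pyRange ((pat.toList.length : Int) - 1) (-1) (-1)).foldl
    (pvStepA pat.toList) (List.replicate 26 none)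

-- ===== PORT B =====
-- body of B's forward 'for j in range(m)': update last[ind], allocate on first
-- occurrence, then write column j of every existing row from last
def pvStepB (s : List Char) (st : List (Option (List Int)) × List Int) (j : Int) :
    List (Option (List Int)) × List Int :=
  let ind : Int := ((PySem.List.pyGetD s j ' ').toNat : Int) - 97
  let last := PySem.List.pySetD st.2 ind j
  let mat := if PySem.List.pyGetD st.1 ind none = none
    then PySem.List.pySetD st.1 ind (some (List.replicate s.length (-1))) else st.1
  let mat := (PySem.List.pyRange 0 26 1).foldl
    (fun mat c => match PySem.List.pyGetD mat c none with
      | none => mat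
      | some row =>
          PySem.List.pySetD mat c (some (PySem.List.pySetD row j (PySem.List.pyGetD last c (-1))))) mat
  (mat, last)

def bad_character_matrix_alt (pat : String) : List (Option (List Int)) :=
  ((PySem.List.pyRange 0 (pat.toList.length : Int) 1).foldl (pvStepB pat.toList)
    (List.replicate 26 none, List.replicate 26 (-1))).1

-- ===== PRECONDITION & SPEC =====
-- Pre_ holds exactly when Python A returns: any character with code outside [71,122]
-- makes ord(c)-97 fall outside [-26,26) and A raises IndexError on the 26-slot table
-- (codes 71..96 wrap around via Python's negative indexing and are accepted; B raises
-- on exactly the same inputs).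
def Pre_bad_character_matrix (pat : String) : Prop :=
  pat.toList.all (fun c => 71 ≤ c.toNat && c.toNat ≤ 122) = true
instance (pat : String) : Decidable (Pre_bad_character_matrix pat) := by
  unfold Pre_bad_character_matrix; infer_instance
def pvWitness_bad_character_matrix : String := "zebrazeal"
def Spec_bad_character_matrix (pat : String) (out : List (Option (List Int))) : Prop :=
  out = bad_character_matrix_alt pat
instance (pat : String) (out : List (Option (List Int))) : Decidable (Spec_bad_character_matrix pat out) := by
  unfold Spec_bad_character_matrix; infer_instance

-- ===== CLAIM (what is proved, stated in full; the proofs are below) =====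
def Claim_equal_bad_character_matrix : Prop := ∀ (pat : String), Dom_bad_character_matrix pat → Pre_bad_character_matrix pat → Spec_bad_character_matrix pat (bad_character_matrix pat)

-- ===== LEMMAS AND PROOFS =====

-- the effective (wrapped) row index of a character, a Nat in [0,26) under Pre_
def pvSlot (c : Char) : Nat :=
  if (c.toNat : Int) - 97 < 0 then ((c.toNat : Int) - 97 + 26).toNat
  else ((c.toNat : Int) - 97).toNat

-- last index p in the half-open window [i,j) with pvSlot s[p] = k, else -1
def pvLastW (s : List Char) (k i j : Nat) : Int :=
  ((((List.range' i (j - i)).filter (fun p => pvSlot (s.getD p ' ') = k)).getLast?).map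
    (fun p => (p : Int))).getD (-1)

def pvRowA (s : List Char) (k i : Nat) : List Int :=
  (List.range s.length).map (fun j => pvLastW s k i (j+1))

-- A's matrix after having processed indices i..len-1
def pvSpecMat (s : List Char) (i : Nat) : List (Option (List Int)) :=
  (List.range 26).map (fun k =>
    if pvLastW s k i s.length = -1 then none else some (pvRowA s k i))

def pvRowB (s : List Char) (k j0 : Nat) : List Int :=
  (List.range s.length).map (fun j => if j < j0 then pvLastW s k 0 (j+1) else -1)

-- B's matrix and last array after having processed columns 0..j0-1
def pvMatB (s : List Char) (j0 : Nat) : List (Option (List Int)) :=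
  (List.range 26).map (fun k =>
    if pvLastW s k 0 j0 = -1 then none else some (pvRowB s k j0))

def pvLastL (s : List Char) (j0 : Nat) : List Int :=
  (List.range 26).map (fun k => pvLastW s k 0 j0)

lemma pvSlot_lt (c : Char) (h1 : 71 ≤ c.toNat) (h2 : c.toNat ≤ 122) : pvSlot c < 26 := by
  unfold pvSlot; split <;> omega

lemma pyGetD_idx {α : Type} (xs : List α) (d : α) (i : Int)
    (h1 : -(xs.length : Int) ≤ i) (h2 : i < xs.length) :
    PySem.List.pyGetD xs i d = xs.getD (if i < 0 then (i + xs.length).toNat else i.toNat) d := by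
  unfold PySem.List.pyGetD PySem.List.pyGet? PySem.List.pyIdx?
  split
  · next h0 =>
    rw [if_neg (by omega)]
    simp [List.getD]
  · next h0 =>
    rw [if_pos (by omega)]
    have : (i + (xs.length : Int)).toNat = xs.length - (-i).toNat := by omega
    rw [this]
    simp [List.getD]

lemma pySetD_idx {α : Type} (xs : List α) (v : α) (i : Int)
    (h1 : -(xs.length : Int) ≤ i) (h2 : i < xs.length) :
    PySem.List.pySetD xs i v = xs.set (if i < 0 then (i + xs.length).toNat else i.toNat) v := by
  unfold PySem.List.pySetD PySem.List.pySet? PySem.List.pyIdx?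
  split
  · next h0 =>
    rw [if_neg (by omega)]
    simp
  · next h0 =>
    rw [if_pos (by omega)]
    have : (i + (xs.length : Int)).toNat = xs.length - (-i).toNat := by omega
    rw [this]
    simp

lemma pyGetD_slot {α : Type} (xs : List α) (d : α) (c : Char)
    (hlen : xs.length = 26) (h1 : 71 ≤ c.toNat) (h2 : c.toNat ≤ 122) :
    PySem.List.pyGetD xs ((c.toNat : Int) - 97) d = xs.getD (pvSlot c) d := by
  rw [pyGetD_idx xs d _ (by rw [hlen]; omega) (by rw [hlen]; omega)]
  unfold pvSlot
  rw [hlen]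
  norm_num

lemma pySetD_slot {α : Type} (xs : List α) (v : α) (c : Char)
    (hlen : xs.length = 26) (h1 : 71 ≤ c.toNat) (h2 : c.toNat ≤ 122) :
    PySem.List.pySetD xs ((c.toNat : Int) - 97) v = xs.set (pvSlot c) v := by
  rw [pySetD_idx xs v _ (by rw [hlen]; omega) (by rw [hlen]; omega)]
  unfold pvSlot
  rw [hlen]
  norm_num

lemma getD_map_range' {α : Type} (f : Nat → α) (n k : Nat) (hk : k < n) (d : α) :
    ((List.range n).map f).getD k d = f k := by
  rw [List.getD_eq_getElem _ _ (by simpa using hk)]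
  simp

lemma set_map_range {α : Type} (f : Nat → α) (n p : Nat) (v : α) :
    ((List.range n).map f).set p v = (List.range n).map (fun k => if k = p then v else f k) := by
  apply List.ext_getElem (by simp)
  intro k h1 h2
  simp only [List.getElem_set, List.getElem_map, List.getElem_range]
  by_cases h : p = k
  · rw [if_pos h, if_pos h.symm]
  · rw [if_neg h, if_neg (fun hk => h hk.symm)]

lemma pvLastW_neg1_iff (s : List Char) (k i j : Nat) :
    pvLastW s k i j = -1 ↔ ∀ p, i ≤ p → p < j → pvSlot (s.getD p ' ') ≠ k := by
  constructor
  · intro h p hip hpj hk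
    have hmem : p ∈ (List.range' i (j - i)).filter (fun p => decide (pvSlot (s.getD p ' ') = k)) := by
      rw [List.mem_filter]
      refine ⟨by rw [List.mem_range'_1]; omega, ?_⟩
      simp only [decide_eq_true_eq]
      exact hk
    rcases hg : ((List.range' i (j - i)).filter (fun p => decide (pvSlot (s.getD p ' ') = k))).getLast? with _ | q
    · rw [List.getLast?_eq_none_iff] at hg
      rw [hg] at hmem
      exact absurd hmem (List.not_mem_nil)
    · unfold pvLastW at h
      rw [hg] at h
      simp at h
  · intro h
    have hnil : (List.range' i (j - i)).filter (fun p => decide (pvSlot (s.getD p ' ') = k)) = [] := by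
      rw [List.filter_eq_nil_iff]
      intro a ha
      rw [List.mem_range'_1] at ha
      simp only [decide_eq_true_eq]
      exact h a ha.1 (by omega)
    unfold pvLastW
    rw [hnil]
    rfl

lemma pvLastW_empty (s : List Char) (k i j : Nat) (h : j ≤ i) : pvLastW s k i j = -1 := by
  unfold pvLastW
  have h0 : j - i = 0 := by omega
  rw [h0]
  rfl

lemma pvLastW_succ (s : List Char) (k i j : Nat) (h : i ≤ j) :
    pvLastW s k i (j+1) = if pvSlot (s.getD j ' ') = k then (j : Int) else pvLastW s k i j := by
  unfold pvLastW
  have h1 : j + 1 - i = (j - i) + 1 := by omega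
  rw [h1, List.range'_concat]
  have h2 : i + 1 * (j - i) = j := by omega
  rw [h2, List.filter_append, List.filter_singleton]
  by_cases hk : pvSlot (s.getD j ' ') = k
  · rw [if_pos hk, show decide (pvSlot (s.getD j ' ') = k) = true by simpa using hk,
      cond_true, List.getLast?_concat]
    rfl
  · rw [if_neg hk, show decide (pvSlot (s.getD j ' ') = k) = false by simpa using hk,
      cond_false, List.append_nil]

lemma pvLastW_cons (s : List Char) (k i j : Nat) (h : i < j) :
    pvLastW s k i j =
      if pvSlot (s.getD i ' ') = k then
        (if pvLastW s k (i+1) j = -1 then (i : Int) else pvLastW s k (i+1) j)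
      else pvLastW s k (i+1) j := by
  unfold pvLastW
  have h1 : j - i = (j - (i + 1)) + 1 := by omega
  rw [h1, List.range'_succ, List.filter_cons]
  by_cases hk : pvSlot (s.getD i ' ') = k
  · rw [if_pos (by simpa using hk), if_pos hk]
    rcases hr : (List.range' (i+1) (j - (i+1))).filter (fun p => decide (pvSlot (s.getD p ' ') = k)) with _ | ⟨x, xs⟩
    · simp
    · rw [List.getLast?_cons_cons]
      rcases hg : (x :: xs).getLast? with _ | q
      · rw [List.getLast?_eq_none_iff] at hg
        exact absurd hg (by simp)
      · simp
  · rw [if_neg (by simpa using hk), if_neg hk]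

lemma pvLastW_mono (s : List Char) (k i : Nat) {a b : Nat} (hab : a ≤ b)
    (h : pvLastW s k i a ≠ -1) : pvLastW s k i b ≠ -1 := by
  intro hb
  apply h
  rw [pvLastW_neg1_iff] at hb ⊢
  intro p hip hpa
  exact hb p hip (by omega)

lemma pvFillA_spec (v : Int) : ∀ (n i m : Nat) (f : Nat → Int), i + n = m →
    (∀ a b, i ≤ a → a ≤ b → b < m → f a ≠ -1 → f b ≠ -1) →
    pvFillA v (PySem.List.pyRange (i : Int) (m : Int) 1) ((List.range m).map f)
      = (List.range m).map (fun j => if i ≤ j ∧ f j = -1 then v else f j) := by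
  intro n
  induction n with
  | zero =>
    intro i m f him _
    rw [PySem.List.pyRange_one_eq_nil (by omega)]
    unfold pvFillA
    apply List.map_congr_left
    intro j hj
    rw [List.mem_range] at hj
    rw [if_neg (by omega)]
  | succ n ih =>
    intro i m f him hmono
    rw [PySem.List.pyRange_one_cons (by omega)]
    unfold pvFillA
    have hgi : PySem.List.pyGetD ((List.range m).map f) (i : Int) 0 = f i := by
      rw [PySem.List.pyGetD_natCast, getD_map_range' f m i (by omega)]
    rw [hgi]
    by_cases hfi : f i = -1
    · rw [if_pos hfi]
      have hset : PySem.List.pySetD ((List.range m).map f) (i : Int) v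
          = (List.range m).map (fun k => if k = i then v else f k) := by
        rw [PySem.List.pySetD_natCast, set_map_range]
      have hcast : ((i : Int) + 1) = ((i + 1 : Nat) : Int) := by push_cast; ring
      rw [hset, hcast, ih (i+1) m (fun k => if k = i then v else f k) (by omega) ?_]
      · apply List.map_congr_left
        intro j hj
        rw [List.mem_range] at hj
        by_cases hji : j = i
        · subst hji
          simp [hfi]
        · rw [if_neg hji]
          by_cases hfj : f j = -1
          · by_cases hle : i + 1 ≤ j
            · rw [if_pos ⟨hle, hfj⟩, if_pos ⟨by omega, hfj⟩]
            · rw [if_neg (by omega), if_neg (by omega)]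
          · rw [if_neg (fun h => hfj h.2), if_neg (fun h => hfj h.2)]
      · intro a b ha hab hb hfa
        have hai : a ≠ i := by omega
        have hbi : b ≠ i := by omega
        simp only [if_neg hai] at hfa
        simp only [if_neg hbi]
        exact hmono a b (by omega) hab hb hfa
    · rw [if_neg hfi]
      apply Eq.symm
      apply List.map_congr_left
      intro j hj
      rw [List.mem_range] at hj
      by_cases hij : i ≤ j
      · rw [if_neg (fun hc => (hmono i j (le_refl _) hij hj hfi) hc.2)]
      · rw [if_neg (by omega)]

lemma pvFoldUpd (g : Int → List Int → List Int) :
    ∀ (L : List Int) (F : Nat → Option (List Int)), L.Nodup → (∀ c ∈ L, 0 ≤ c ∧ c < 26) →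
    L.foldl (fun mat c => match PySem.List.pyGetD mat c none with
      | none => mat
      | some row => PySem.List.pySetD mat c (some (g c row))) ((List.range 26).map F)
    = (List.range 26).map (fun (k : Nat) => if (k : Int) ∈ L then (F k).map (g (k : Int)) else F k) := by
  intro L
  induction L with
  | nil =>
    intro F _ _
    simp
  | cons c L ih =>
    intro F hnd hlt
    have hc : 0 ≤ c ∧ c < 26 := hlt c List.mem_cons_self
    obtain ⟨cn, rfl⟩ : ∃ cn : Nat, c = (cn : Int) := ⟨c.toNat, by omega⟩
    have hcn26 : cn < 26 := by omega
    rw [List.foldl_cons]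
    have hget : PySem.List.pyGetD ((List.range 26).map F) (cn : Int) none = F cn := by
      rw [PySem.List.pyGetD_natCast, getD_map_range' F 26 cn hcn26]
    rw [hget]
    have hstep : (match F cn with
          | none => (List.range 26).map F
          | some row => PySem.List.pySetD ((List.range 26).map F) (cn : Int) (some (g (cn : Int) row)))
        = (List.range 26).map (fun k => if k = cn then (F cn).map (g (cn : Int)) else F k) := by
      rcases hFc : F cn with _ | row
      · dsimp only
        apply List.map_congr_left
        intro k hk
        by_cases hkc : k = cn
        · rw [if_pos hkc, hkc, hFc]
          rfl
        · rw [if_neg hkc]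
      · dsimp only
        rw [PySem.List.pySetD_natCast, set_map_range]
        apply List.map_congr_left
        intro k hk
        by_cases hkc : k = cn
        · rw [if_pos hkc, if_pos hkc]
          rfl
        · rw [if_neg hkc, if_neg hkc]
    rw [hstep, ih _ (List.nodup_cons.mp hnd).2 (fun x hx => hlt x (List.mem_cons_of_mem _ hx))]
    apply List.map_congr_left
    intro k hk
    rw [List.mem_range] at hk
    by_cases hkc : k = cn
    · subst hkc
      have hknL : (k : Int) ∉ L := (List.nodup_cons.mp hnd).1
      rw [if_neg hknL, if_pos rfl, if_pos List.mem_cons_self]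
    · rw [if_neg hkc]
      have hne : (k : Int) ≠ (cn : Int) := by
        intro hx
        exact hkc (by omega)
      by_cases hkL : (k : Int) ∈ L
      · rw [if_pos hkL, if_pos (List.mem_cons_of_mem _ hkL)]
      · rw [if_neg hkL, if_neg (by simp only [List.mem_cons]; exact fun hx => hx.elim (fun h1 => hne h1) (fun h2 => hkL h2))]

-- window shrink/skip helpers
lemma pvLastW_sub (s : List Char) (k i : Nat) {a b : Nat} (hab : a ≤ b)
    (h : pvLastW s k i b = -1) : pvLastW s k i a = -1 := by
  by_contra hne
  exact (pvLastW_mono s k i hab hne) h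

lemma pvLastW_skip (s : List Char) (k i j : Nat) (h : pvSlot (s.getD i ' ') ≠ k) :
    pvLastW s k i j = pvLastW s k (i+1) j := by
  by_cases hij : i < j
  · rw [pvLastW_cons s k i j hij, if_neg h]
  · rw [pvLastW_empty s k i j (by omega), pvLastW_empty s k (i+1) j (by omega)]

-- the row functions behind pvSpecMat / pvMatB
def pvFA (s : List Char) (i : Nat) (k : Nat) : Option (List Int) :=
  if pvLastW s k i s.length = -1 then none else some (pvRowA s k i)

def pvFB (s : List Char) (j0 : Nat) (k : Nat) : Option (List Int) :=
  if pvLastW s k 0 j0 = -1 then none else some (pvRowB s k j0)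

lemma pvSpecMat_eq (s : List Char) (i : Nat) :
    pvSpecMat s i = (List.range 26).map (pvFA s i) := rfl

lemma pvMatB_eq (s : List Char) (j0 : Nat) :
    pvMatB s j0 = (List.range 26).map (pvFB s j0) := rfl

lemma pvStepA_spec (s : List Char) (hs : ∀ c ∈ s, 71 ≤ c.toNat ∧ c.toNat ≤ 122)
    (i : Nat) (hi : i < s.length) :
    pvStepA s (pvSpecMat s (i+1)) (i : Int) = pvSpecMat s i := by
  have hmem : s.getD i ' ' ∈ s := by
    rw [List.getD_eq_getElem s ' ' hi]
    exact List.getElem_mem hi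
  obtain ⟨hc1, hc2⟩ := hs _ hmem
  have hk026 : pvSlot (s.getD i ' ') < 26 := pvSlot_lt _ hc1 hc2
  unfold pvStepA
  dsimp only
  rw [PySem.List.pyGetD_natCast]
  rw [pvSpecMat_eq s (i+1)]
  rw [pyGetD_slot _ none (s.getD i ' ') (by simp) hc1 hc2]
  rw [getD_map_range' (pvFA s (i+1)) 26 _ hk026]
  have hmat' : (if pvFA s (i+1) (pvSlot (s.getD i ' ')) = none
      then PySem.List.pySetD ((List.range 26).map (pvFA s (i+1)))
        ((((s.getD i ' ').toNat : Int)) - 97) (some (List.replicate s.length (-1)))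
      else (List.range 26).map (pvFA s (i+1)))
      = (List.range 26).map (fun k => if k = pvSlot (s.getD i ' ')
          then some (pvRowA s (pvSlot (s.getD i ' ')) (i+1)) else pvFA s (i+1) k) := by
    by_cases hn : pvLastW s (pvSlot (s.getD i ' ')) (i+1) s.length = -1
    · rw [if_pos (by unfold pvFA; rw [if_pos hn])]
      rw [pySetD_slot _ _ (s.getD i ' ') (by simp) hc1 hc2, set_map_range]
      apply List.map_congr_left
      intro k hk
      by_cases hkc : k = pvSlot (s.getD i ' ')
      · rw [if_pos hkc, if_pos hkc]
        congr 1
        unfold pvRowA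
        rw [show List.replicate s.length (-1 : Int)
            = (List.range s.length).map (fun _ => (-1 : Int)) from by
          rw [List.map_const', List.length_range]]
        apply List.map_congr_left
        intro j hj
        rw [List.mem_range] at hj
        exact (pvLastW_sub s _ (i+1) (by omega) hn).symm
      · rw [if_neg hkc, if_neg hkc]
    · rw [if_neg (by unfold pvFA; rw [if_neg hn]; simp)]
      apply List.map_congr_left
      intro k hk
      by_cases hkc : k = pvSlot (s.getD i ' ')
      · rw [if_pos hkc, hkc]
        unfold pvFA
        rw [if_neg hn]
      · rw [if_neg hkc]
  rw [hmat']
  rw [pyGetD_slot _ none (s.getD i ' ') (by simp) hc1 hc2, getD_map_range' _ 26 _ hk026,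
    if_pos rfl]
  rw [show (some (pvRowA s (pvSlot (s.getD i ' ')) (i+1))).getD []
      = pvRowA s (pvSlot (s.getD i ' ')) (i+1) from rfl]
  rw [show pvRowA s (pvSlot (s.getD i ' ')) (i+1)
      = (List.range s.length).map (fun j => pvLastW s (pvSlot (s.getD i ' ')) (i+1) (j+1))
      from rfl]
  rw [pvFillA_spec (↑i) (s.length - i) i s.length
    (fun j => pvLastW s (pvSlot (s.getD i ' ')) (i+1) (j+1)) (by omega)
    (fun a b ha hab hb hfa => pvLastW_mono s _ (i+1) (by omega) hfa)]
  rw [pySetD_slot _ _ (s.getD i ' ') (by simp) hc1 hc2, set_map_range]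
  rw [pvSpecMat_eq s i]
  apply List.map_congr_left
  intro k hk
  rw [List.mem_range] at hk
  by_cases hkc : k = pvSlot (s.getD i ' ')
  · rw [if_pos hkc]
    unfold pvFA
    rw [if_neg (show ¬ pvLastW s k i s.length = -1 by
      rw [hkc]
      intro hcontra
      rw [pvLastW_neg1_iff] at hcontra
      exact hcontra i (le_refl _) hi rfl)]
    congr 1
    subst hkc
    unfold pvRowA
    apply List.map_congr_left
    intro j hj
    rw [List.mem_range] at hj
    by_cases hij : i ≤ j
    · rw [pvLastW_cons s _ i (j+1) (by omega), if_pos rfl]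
      by_cases hfj : pvLastW s (pvSlot (s.getD i ' ')) (i+1) (j+1) = -1
      · rw [if_pos ⟨hij, hfj⟩, if_pos hfj]
      · rw [if_neg (fun h => hfj h.2), if_neg hfj]
    · rw [if_neg (fun h => hij h.1)]
      rw [pvLastW_empty s _ (i+1) (j+1) (by omega), pvLastW_empty s _ i (j+1) (by omega)]
  · unfold pvFA
    rw [pvLastW_skip s k i s.length (fun h => hkc h.symm)]
    have hrow : pvRowA s k i = pvRowA s k (i+1) := by
      unfold pvRowA
      apply List.map_congr_left
      intro j hj
      exact pvLastW_skip s k i (j+1) (fun h => hkc h.symm)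
    rw [hrow]
    simp only [if_neg hkc]

lemma pvStepB_spec (s : List Char) (hs : ∀ c ∈ s, 71 ≤ c.toNat ∧ c.toNat ≤ 122)
    (j : Nat) (hj : j < s.length) :
    pvStepB s (pvMatB s j, pvLastL s j) (j : Int) = (pvMatB s (j+1), pvLastL s (j+1)) := by
  have hmem : s.getD j ' ' ∈ s := by
    rw [List.getD_eq_getElem s ' ' hj]
    exact List.getElem_mem hj
  obtain ⟨hc1, hc2⟩ := hs _ hmem
  have hk026 : pvSlot (s.getD j ' ') < 26 := pvSlot_lt _ hc1 hc2
  unfold pvStepB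
  dsimp only
  rw [PySem.List.pyGetD_natCast]
  have hlast : PySem.List.pySetD (pvLastL s j) ((((s.getD j ' ').toNat : Int)) - 97) (j : Int)
      = pvLastL s (j+1) := by
    rw [pySetD_slot _ _ (s.getD j ' ') (by simp [pvLastL]) hc1 hc2]
    unfold pvLastL
    rw [set_map_range]
    apply List.map_congr_left
    intro k hk
    rw [pvLastW_succ s k 0 j (by omega)]
    by_cases hkc : k = pvSlot (s.getD j ' ')
    · rw [if_pos hkc, if_pos hkc.symm]
    · rw [if_neg hkc, if_neg (fun h => hkc h.symm)]
  rw [hlast]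
  have hj1 : pvLastW s (pvSlot (s.getD j ' ')) 0 (j+1) ≠ -1 := by
    rw [pvLastW_succ s _ 0 j (by omega), if_pos rfl]
    omega
  rw [pvMatB_eq s j]
  rw [pyGetD_slot _ none (s.getD j ' ') (by simp) hc1 hc2, getD_map_range' (pvFB s j) 26 _ hk026]
  have hmat' : (if pvFB s j (pvSlot (s.getD j ' ')) = none
      then PySem.List.pySetD ((List.range 26).map (pvFB s j))
        ((((s.getD j ' ').toNat : Int)) - 97) (some (List.replicate s.length (-1)))
      else (List.range 26).map (pvFB s j))
      = (List.range 26).map (fun k => if pvLastW s k 0 (j+1) = -1 then none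
          else some (pvRowB s k j)) := by
    by_cases hn : pvLastW s (pvSlot (s.getD j ' ')) 0 j = -1
    · rw [if_pos (by unfold pvFB; rw [if_pos hn])]
      rw [pySetD_slot _ _ (s.getD j ' ') (by simp) hc1 hc2, set_map_range]
      apply List.map_congr_left
      intro k hk
      by_cases hkc : k = pvSlot (s.getD j ' ')
      · rw [if_pos hkc, if_neg (by rw [hkc]; exact hj1)]
        congr 1
        unfold pvRowB
        rw [show List.replicate s.length (-1 : Int)
            = (List.range s.length).map (fun _ => (-1 : Int)) from by
          rw [List.map_const', List.length_range]]
        apply List.map_congr_left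
        intro j' hj'
        by_cases hlt : j' < j
        · rw [if_pos hlt, hkc]
          exact (pvLastW_sub s _ 0 (by omega) hn).symm
        · rw [if_neg hlt]
      · rw [if_neg hkc]
        unfold pvFB
        rw [pvLastW_succ s k 0 j (by omega),
          if_neg (show ¬ pvSlot (s.getD j ' ') = k from fun h => hkc h.symm)]
    · rw [if_neg (by unfold pvFB; rw [if_neg hn]; simp)]
      apply List.map_congr_left
      intro k hk
      unfold pvFB
      by_cases hkc : k = pvSlot (s.getD j ' ')
      · rw [if_neg (by rw [hkc]; exact hn), if_neg (by rw [hkc]; exact hj1)]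
      · rw [pvLastW_succ s k 0 j (by omega),
          if_neg (show ¬ pvSlot (s.getD j ' ') = k from fun h => hkc h.symm)]
  rw [hmat']
  rw [pvFoldUpd (fun c row => PySem.List.pySetD row (j : Int)
      (PySem.List.pyGetD (pvLastL s (j+1)) c (-1))) (PySem.List.pyRange 0 26 1)
      (fun k => if pvLastW s k 0 (j+1) = -1 then none else some (pvRowB s k j))
      (PySem.List.nodup_pyRange_one 0 26)
      (fun c hc => by rw [PySem.List.mem_pyRange_one] at hc; exact ⟨hc.1, hc.2⟩)]
  rw [Prod.mk.injEq]
  refine ⟨?_, rfl⟩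
  rw [pvMatB_eq s (j+1)]
  apply List.map_congr_left
  intro k hk
  rw [List.mem_range] at hk
  rw [if_pos (by rw [PySem.List.mem_pyRange_one]; exact ⟨by omega, by omega⟩)]
  by_cases hkneg : pvLastW s k 0 (j+1) = -1
  · rw [if_pos hkneg]
    unfold pvFB
    rw [if_pos hkneg]
    rfl
  · rw [if_neg hkneg]
    unfold pvFB
    rw [if_neg hkneg]
    rw [Option.map_some]
    congr 1
    rw [PySem.List.pyGetD_natCast]
    rw [show (pvLastL s (j+1)).getD k (-1) = pvLastW s k 0 (j+1) from by
      unfold pvLastL; exact getD_map_range' _ 26 k hk _]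
    rw [PySem.List.pySetD_natCast]
    unfold pvRowB
    rw [set_map_range]
    apply List.map_congr_left
    intro j' hj'
    rw [List.mem_range] at hj'
    by_cases hjj : j' = j
    · subst hjj
      rw [if_pos rfl, if_pos (by omega)]
    · rw [if_neg hjj]
      by_cases hlt : j' < j
      · rw [if_pos hlt, if_pos (by omega)]
      · rw [if_neg hlt, if_neg (by omega)]

lemma pvA_loop (s : List Char) (hs : ∀ c ∈ s, 71 ≤ c.toNat ∧ c.toNat ≤ 122) :
    ∀ i, i ≤ s.length →
    (PySem.List.pyRange ((i : Int) - 1) (-1) (-1)).foldl (pvStepA s) (pvSpecMat s i)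
      = pvSpecMat s 0 := by
  intro i
  induction i with
  | zero =>
    intro _
    rw [show ((0 : Nat) : Int) - 1 = -1 by norm_num]
    rw [PySem.List.pyRange_neg_one_eq_nil (by omega)]
    rfl
  | succ i ih =>
    intro h
    rw [show (((i+1 : Nat)) : Int) - 1 = (i : Int) by push_cast; ring]
    rw [PySem.List.pyRange_neg_one_cons (by omega)]
    rw [List.foldl_cons]
    rw [pvStepA_spec s hs i (by omega)]
    exact ih (by omega)

lemma pvB_loop (s : List Char) (hs : ∀ c ∈ s, 71 ≤ c.toNat ∧ c.toNat ≤ 122) :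
    ∀ j, j ≤ s.length →
    (PySem.List.pyRange 0 (j : Int) 1).foldl (pvStepB s) (pvMatB s 0, pvLastL s 0)
      = (pvMatB s j, pvLastL s j) := by
  intro j
  induction j with
  | zero =>
    intro _
    rw [PySem.List.pyRange_one_eq_nil (by omega)]
    rfl
  | succ j ih =>
    intro h
    rw [show (((j+1 : Nat)) : Int) = (j : Int) + 1 by push_cast; ring]
    rw [PySem.List.pyRange_one_succ_right (by omega)]
    rw [List.foldl_append, ih (by omega), List.foldl_cons, List.foldl_nil]
    exact pvStepB_spec s hs j (by omega)

lemma pvA_eq (pat : String) (hs : ∀ c ∈ pat.toList, 71 ≤ c.toNat ∧ c.toNat ≤ 122) :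
    bad_character_matrix pat = pvSpecMat pat.toList 0 := by
  unfold bad_character_matrix
  have hinit : List.replicate 26 (none : Option (List Int))
      = pvSpecMat pat.toList pat.toList.length := by
    unfold pvSpecMat
    rw [List.map_congr_left (fun k (_ : k ∈ List.range 26) =>
      (if_pos (pvLastW_empty pat.toList k pat.toList.length pat.toList.length (le_refl _)) :
        (if pvLastW pat.toList k pat.toList.length pat.toList.length = -1 then none
          else some (pvRowA pat.toList k pat.toList.length)) = none))]
    rw [List.map_const', List.length_range]
  rw [hinit]
  exact pvA_loop pat.toList hs pat.toList.length (le_refl _)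

lemma pvB_eq (pat : String) (hs : ∀ c ∈ pat.toList, 71 ≤ c.toNat ∧ c.toNat ≤ 122) :
    bad_character_matrix_alt pat = pvSpecMat pat.toList 0 := by
  unfold bad_character_matrix_alt
  have hm : List.replicate 26 (none : Option (List Int)) = pvMatB pat.toList 0 := by
    unfold pvMatB
    rw [List.map_congr_left (fun k (_ : k ∈ List.range 26) =>
      (if_pos (pvLastW_empty pat.toList k 0 0 (le_refl _)) :
        (if pvLastW pat.toList k 0 0 = -1 then none
          else some (pvRowB pat.toList k 0)) = none))]
    rw [List.map_const', List.length_range]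
  have hl : List.replicate 26 (-1 : Int) = pvLastL pat.toList 0 := by
    unfold pvLastL
    rw [List.map_congr_left (fun k (_ : k ∈ List.range 26) =>
      pvLastW_empty pat.toList k 0 0 (le_refl _))]
    rw [List.map_const', List.length_range]
  rw [hm, hl, pvB_loop pat.toList hs pat.toList.length (le_refl _)]
  rw [pvMatB_eq, pvSpecMat_eq]
  apply List.map_congr_left
  intro k hk
  unfold pvFB pvFA
  have hrow : pvRowB pat.toList k pat.toList.length = pvRowA pat.toList k 0 := by
    unfold pvRowB pvRowA
    apply List.map_congr_left
    intro j hj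
    rw [List.mem_range] at hj
    rw [if_pos hj]
  rw [hrow]

-- ===== VERDICT (by name: the statement is the Claim_ definition above) =====
theorem bad_character_matrix_spec : Claim_equal_bad_character_matrix := by
  intro pat _ hpre
  unfold Spec_bad_character_matrix
  have hs : ∀ c ∈ pat.toList, 71 ≤ c.toNat ∧ c.toNat ≤ 122 := by
    intro c hc
    have := List.all_eq_true.mp hpre c hc
    simpa using this
  rw [pvA_eq pat hs, pvB_eq pat hs]
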